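-- pv_equiv track=rewrite | github.com/TheFiveBoxingWizardsJumpQuickly/CipherToolBox | app/cipher/transposition.py | swap_xy_axes
-- ===== SOURCE A (Python) =====
-- def swap_xy_axes(text):
--     a = text.split('\n')
--     max_y = len(a)
--     max_x = 1
--     for r in a:
--         max_x = max(max_x, len(r))
--
--     a2 = []
--     for r in a:
--         a2.append(r + ' '*(max_x - len(r)))
--
--     b = []
--
--     for x in range(max_x):
--         c = ''
--         for y in range(max_y):
--             c += a2[y][x]
--         b.append(c)
--
--     return '\n'.join(b)
-- ===== SOURCE B (Python) =====
-- def swap_xy_axes(text):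
--     # One pass over the raw character stream: scatter each char into its column
--     # buffer (padding the buffer with spaces up to the current row first), then
--     # pad every column to the row count at the end. No grid is ever built.
--     cols = ['']
--     y = 0
--     x = 0
--     for ch in text:
--         if ch == '\n':
--             y += 1
--             x = 0
--         else:
--             if x == len(cols):
--                 cols.append('')
--             cols[x] = cols[x] + ' ' * (y - len(cols[x])) + ch
--             x += 1
--     n = y + 1
--     return '\n'.join(c + ' ' * (n - len(c)) for c in cols)
-- ===== Notes on version B (the rewrite author's own statement) =====
-- stated objective: alternative
-- what changed: B never builds the padded line grid A transposes: it makes a single pass over the raw character stream, tracking a (row, column) cursor and scattering each character directly into its column buffer (space-filling the buffer up to the current row on the fly), then pads the buffers to the row count at the end; A instead splits into lines, computes the max width, pads every line, and reads the grid back with a double index loop.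
import Mathlib
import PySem

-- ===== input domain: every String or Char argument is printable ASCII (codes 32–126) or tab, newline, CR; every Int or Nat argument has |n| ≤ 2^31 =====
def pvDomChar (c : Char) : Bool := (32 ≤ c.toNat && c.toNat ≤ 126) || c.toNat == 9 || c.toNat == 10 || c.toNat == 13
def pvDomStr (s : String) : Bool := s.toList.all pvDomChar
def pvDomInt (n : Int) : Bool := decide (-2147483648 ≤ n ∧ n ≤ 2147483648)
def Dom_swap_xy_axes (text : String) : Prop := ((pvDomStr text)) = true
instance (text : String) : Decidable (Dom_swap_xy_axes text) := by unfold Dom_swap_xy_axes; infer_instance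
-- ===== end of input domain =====

-- B replaces A's build-a-padded-grid-then-read-it-by-double-index strategy by a single
-- pass over the raw character stream that scatters each character directly into its
-- column buffer (objective: alternative decomposition, same asymptotic cost).

-- ===== PORT A =====
-- literal transliteration of A: split, running max, pad loop, double index loop, join
def swap_xy_axes (text : String) : String :=
  let a := PySem.Chars.splitOn text.toList ['\n']
  let max_y := a.length
  let max_x := a.foldl (fun m r => max m r.length) 1
  let a2 := a.foldl (fun acc r => acc ++ [r ++ List.replicate (max_x - r.length) ' ']) []
  let b := (PySem.List.pyRange 0 (max_x : Int) 1).foldl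
    (fun bacc x =>
      bacc ++ [(PySem.List.pyRange 0 (max_y : Int) 1).foldl
        (fun c y => c ++ [PySem.List.pyGetD (PySem.List.pyGetD a2 y []) x ' ']) []])
    []
  String.ofList (PySem.Chars.join ['\n'] b)

-- ===== PORT B =====
-- one step of B's single pass: a newline moves the cursor to the start of the next
-- row; any other char is appended to column buffer x, padding that buffer with
-- spaces up to the current row index first (cols[x] += ' '*(y-len(cols[x])) + ch)
def bStep (st : List (List Char) × Nat × Nat) (ch : Char) : List (List Char) × Nat × Nat :=
  let cols := st.1
  let y := st.2.1
  let x := st.2.2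
  if ch = '\n' then (cols, y + 1, 0)
  else
    let cols1 := if x = cols.length then cols ++ [[]] else cols
    (cols1.set x (cols1.getD x [] ++ List.replicate (y - (cols1.getD x []).length) ' ' ++ [ch]),
     y, x + 1)

def swap_xy_axes_alt (text : String) : String :=
  let st := text.toList.foldl bStep ([[]], 0, 0)
  let cols := st.1
  let n := st.2.1 + 1
  String.ofList (PySem.Chars.join ['\n'] (cols.map (fun c => c ++ List.replicate (n - c.length) ' ')))

-- ===== PRECONDITION & SPEC =====
def Spec_swap_xy_axes (text : String) (out : String) : Prop := out = swap_xy_axes_alt text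
instance (text : String) (out : String) : Decidable (Spec_swap_xy_axes text out) := by unfold Spec_swap_xy_axes; infer_instance

-- ===== CLAIM (what is proved, stated in full; the proofs are below) =====
def Claim_equal_swap_xy_axes : Prop := ∀ (text : String), Dom_swap_xy_axes text → Spec_swap_xy_axes text (swap_xy_axes text)

-- ===== LEMMAS AND PROOFS =====

-- the column k of a list of rows, one char per row, shorter rows read as ' '
def colOf (L : List (List Char)) (k : Nat) : List Char := L.map (fun r => r.getD k ' ')

-- ghost step: how the list of lines of the processed prefix evolves per character
def extChar (L : List (List Char)) (ch : Char) : List (List Char) :=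
  if ch = '\n' then L ++ [[]] else L.dropLast ++ [(L.getLast?.getD []) ++ [ch]]

-- PySem.Chars.splitOn on a one-char separator is List.splitOnP
lemma splitOn_go_eq (fuel : Nat) : ∀ (l cur : List Char) (acc : List (List Char)),
    l.length < fuel →
    PySem.Chars.splitOn.go ['\n'] fuel l cur acc
      = acc.reverse ++ (List.splitOnP (· == '\n') l).modifyHead (cur.reverse ++ ·) := by
  induction fuel with
  | zero => intro l cur acc h; omega
  | succ n ih =>
    intro l cur acc h
    cases l with
    | nil => simp [PySem.Chars.splitOn.go, List.splitOnP_nil]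
    | cons c rest =>
      rw [PySem.Chars.splitOn.go]
      by_cases hc : c = '\n'
      · subst hc
        rw [if_pos (by simp [List.isPrefixOf])]
        rw [ih _ _ _ (by simpa using Nat.lt_of_succ_lt_succ h)]
        rw [List.splitOnP_cons]
        simp only [beq_self_eq_true, if_pos]
        rcases hsp : List.splitOnP (· == '\n') rest with _ | ⟨p, ps⟩
        · exact absurd hsp (List.splitOnP_ne_nil _ _)
        · simp [hsp, List.modifyHead]
      · rw [if_neg (by simp [List.isPrefixOf]; exact fun h => hc h.symm)]
        rw [ih _ _ _ (by simpa using Nat.lt_of_succ_lt_succ h)]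
        rw [List.splitOnP_cons]
        rw [if_neg (by simp [hc])]
        rcases hsp : List.splitOnP (· == '\n') rest with _ | ⟨p, ps⟩
        · exact absurd hsp (List.splitOnP_ne_nil _ _)
        · simp [List.modifyHead]

lemma splitOn_eq (cs : List Char) :
    PySem.Chars.splitOn cs ['\n'] = List.splitOnP (· == '\n') cs := by
  rw [PySem.Chars.splitOn, splitOn_go_eq (cs.length + 1) cs [] [] (by omega)]
  rcases hsp : List.splitOnP (· == '\n') cs with _ | ⟨p, ps⟩
  · exact absurd hsp (List.splitOnP_ne_nil _ _)
  · simp [List.modifyHead]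

lemma foldl_extChar_append (cs : List Char) : ∀ (L M : List (List Char)), M ≠ [] →
    List.foldl extChar (L ++ M) cs = L ++ List.foldl extChar M cs := by
  induction cs with
  | nil => intro L M h; simp
  | cons c rest ih =>
    intro L M h
    simp only [List.foldl_cons]
    by_cases hc : c = '\n'
    · subst hc
      rw [show extChar (L ++ M) '\n' = L ++ (M ++ [[]]) by simp [extChar],
          show extChar M '\n' = M ++ [[]] by simp [extChar]]
      exact ih L (M ++ [[]]) (by simp)
    · have h1 : extChar (L ++ M) c = L ++ extChar M c := by
        simp only [extChar, if_neg hc]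
        rw [List.dropLast_append_of_ne_nil h, List.getLast?_append_of_ne_nil _ h]
        simp
      rw [h1]
      exact ih L _ (by simp [extChar, hc])

lemma foldl_extChar_single (cs : List Char) : ∀ (r : List Char),
    List.foldl extChar [r] cs = (List.foldl extChar [[]] cs).modifyHead (r ++ ·) := by
  induction cs with
  | nil => intro r; simp [List.modifyHead]
  | cons c rest ih =>
    intro r
    simp only [List.foldl_cons]
    by_cases hc : c = '\n'
    · subst hc
      rw [show extChar [r] '\n' = [r] ++ [[]] by simp [extChar],
          show extChar [[]] '\n' = [[]] ++ [[]] by simp [extChar]]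
      rw [foldl_extChar_append rest [r] [[]] (by simp),
          foldl_extChar_append rest [[]] [[]] (by simp)]
      simp [List.modifyHead]
    · rw [show extChar [r] c = [r ++ [c]] by simp [extChar, hc],
          show extChar [[]] c = [[c]] by simp [extChar, hc]]
      rw [ih (r ++ [c]), ih [c]]
      rcases List.foldl extChar [[]] rest with _ | ⟨p, ps⟩ <;> simp [List.modifyHead]

lemma foldl_extChar_eq (cs : List Char) :
    List.foldl extChar [[]] cs = List.splitOnP (· == '\n') cs := by
  induction cs with
  | nil => simp [List.splitOnP_nil]
  | cons c rest ih =>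
    simp only [List.foldl_cons]
    by_cases hc : c = '\n'
    · subst hc
      rw [show extChar [[]] '\n' = [[]] ++ [[]] by simp [extChar],
          foldl_extChar_append rest [[]] [[]] (by simp), ih,
          List.splitOnP_cons, if_pos (by simp)]
      rfl
    · rw [show extChar [[]] c = [[c]] by simp [extChar, hc],
          foldl_extChar_single rest [c], ih,
          List.splitOnP_cons, if_neg (by simp [hc])]
      rcases hsp : List.splitOnP (· == '\n') rest with _ | ⟨p, ps⟩
      · exact absurd hsp (List.splitOnP_ne_nil _ _)
      · simp [List.modifyHead]

-- a ∈ xs bounds the foldr-max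
lemma mem_le_foldr_max (xs : List Nat) (a : Nat) (h : a ∈ xs) : a ≤ xs.foldr max 0 := by
  induction xs with
  | nil => cases h
  | cons b bs ih =>
    rcases List.mem_cons.mp h with rfl | h'
    · exact le_max_left _ _
    · exact le_trans (ih h') (le_max_right _ _)

lemma foldr_max_init (xs : List Nat) (a : Nat) : xs.foldr max a = max (xs.foldr max 0) a := by
  induction xs with
  | nil => simp
  | cons b bs ih => simp [ih, Nat.max_assoc]

-- A's running max with init equals init ⊔ (foldr max 0 of the lengths)
lemma foldl_max_len (l : List (List Char)) (init : Nat) :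
    l.foldl (fun m r => max m r.length) init = max init ((l.map List.length).foldr max 0) := by
  induction l generalizing init with
  | nil => simp
  | cons r rest ih => simp [ih, Nat.max_assoc]

-- padding a row to any width does not change how a column reads it
lemma getD_pad (r : List Char) (m k : Nat) :
    (r ++ List.replicate (m - r.length) ' ').getD k ' ' = r.getD k ' ' := by
  by_cases hk : k < r.length
  · rw [List.getD_append _ _ _ _ hk]
  · rw [List.getD_eq_default _ _ (le_of_not_gt hk),
        List.getD_append_right _ _ _ _ (le_of_not_gt hk)]
    simp only [List.getD, List.getElem?_replicate]
    split <;> rfl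

-- the invariant of B's single pass: cols are the columns of the lines seen so far,
-- each buffer a prefix of the full (space-padded) column, the rest of which is spaces
def ColInv (L cols : List (List Char)) (y x : Nat) : Prop :=
  L ≠ [] ∧ y + 1 = L.length ∧ x = (L.getLast?.getD []).length ∧
  cols.length = max 1 ((L.map List.length).foldr max 0) ∧
  (∀ i < cols.length,
    cols.getD i [] ++ List.replicate (L.length - (cols.getD i []).length) ' ' = colOf L i) ∧
  (∀ i, x ≤ i → (cols.getD i []).length ≤ y)

lemma colOf_split (L : List (List Char)) (h : L ≠ []) (k : Nat) :
    colOf L k = colOf L.dropLast k ++ [(L.getLast?.getD []).getD k ' '] := by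
  conv_lhs => rw [show L = L.dropLast ++ [L.getLast?.getD []] by
    rw [List.getLast?_eq_some_getLast h]
    simp [List.dropLast_concat_getLast h]]
  simp [colOf]

lemma colinv_step (L cols : List (List Char)) (y x : Nat) (ch : Char)
    (hI : ColInv L cols y x) :
    ColInv (extChar L ch) (bStep (cols, y, x) ch).1
        (bStep (cols, y, x) ch).2.1 (bStep (cols, y, x) ch).2.2 := by
  obtain ⟨hne, hy, hx, hlen, hc1, hc2⟩ := hI
  by_cases hc : ch = '\n'
  · subst hc
    have hb : bStep (cols, y, x) '\n' = (cols, y + 1, 0) := by simp [bStep]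
    have he : extChar L '\n' = L ++ [[]] := by simp [extChar]
    rw [hb, he]
    have hlenD : ∀ i, i < cols.length → (cols.getD i []).length ≤ L.length := by
      intro i hi
      have h' := congrArg List.length (hc1 i hi)
      simp only [List.length_append, List.length_replicate, colOf, List.length_map] at h'
      omega
    refine ⟨by simp, by simp; omega, by simp, ?_, ?_, ?_⟩
    · show cols.length = _
      rw [List.map_append, foldr_max_init]
      simpa using hlen
    · intro i hi
      have hi' : i < cols.length := by simpa using hi
      have heq := hc1 i hi'
      show cols.getD i [] ++ List.replicate ((L ++ [[]]).length - (cols.getD i []).length) ' '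
          = colOf (L ++ [[]]) i
      have hco : colOf (L ++ [[]]) i = colOf L i ++ [' '] := by simp [colOf]
      have h2 : (L ++ [[]]).length - (cols.getD i []).length
          = (L.length - (cols.getD i []).length) + 1 := by
        have := hlenD i hi'
        simp only [List.length_append, List.length_cons, List.length_nil]
        omega
      rw [hco, ← heq, h2, List.replicate_succ', ← List.append_assoc]
    · intro i _
      show (cols.getD i []).length ≤ y + 1
      by_cases hi : i < cols.length
      · have := hlenD i hi
        omega
      · rw [List.getD_eq_default _ _ (le_of_not_gt hi)]
        simp
  · -- a printable char: scatter into column x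
    have hxle : x ≤ cols.length := by
      have hmem : (L.getLast?.getD []).length ∈ L.map List.length := by
        apply List.mem_map.mpr
        exact ⟨L.getLast?.getD [], by
          rw [List.getLast?_eq_some_getLast hne]
          exact ⟨List.getLast_mem hne, rfl⟩⟩
      have := mem_le_foldr_max _ _ hmem
      omega
    simp only [bStep, extChar, if_neg hc]
    set cols1 := if x = cols.length then cols ++ [[]] else cols with hcols1
    set c0 := cols1.getD x [] with hc0
    set newv := c0 ++ List.replicate (y - c0.length) ' ' ++ [ch] with hnewv
    have hLlen : (L.dropLast ++ [(L.getLast?.getD []) ++ [ch]]).length = L.length := by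
      have hdl : L.dropLast.length = L.length - 1 := List.length_dropLast
      have : L.length ≠ 0 := fun h => hne (List.length_eq_zero_iff.mp h)
      simp only [List.length_append, List.length_cons, List.length_nil, hdl]
      omega
    have hcols1len : cols1.length = max cols.length (x + 1) := by
      rw [hcols1]
      by_cases hxc : x = cols.length
      · rw [if_pos hxc]
        simp only [List.length_append, List.length_cons, List.length_nil, hxc]
        omega
      · rw [if_neg hxc]
        have : x < cols.length := lt_of_le_of_ne hxle hxc
        omega
    have hxlt : x < cols1.length := by omega
    have hc0nil : x = cols.length → c0 = [] := by
      intro hxc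
      rw [hc0, hcols1, if_pos hxc,
          List.getD_append_right _ _ _ _ (le_of_eq hxc.symm)]
      simp [hxc]
    have hblank : x = cols.length → colOf L x = List.replicate L.length ' ' := by
      intro hxc
      apply List.eq_replicate_iff.mpr
      refine ⟨by simp [colOf], ?_⟩
      intro b hb
      obtain ⟨r, hr, rfl⟩ := List.mem_map.mp hb
      have hrle : r.length ≤ (L.map List.length).foldr max 0 :=
        mem_le_foldr_max _ _ (List.mem_map.mpr ⟨r, hr, rfl⟩)
      rw [List.getD_eq_default _ _ (by omega)]
    have hc0len : c0.length ≤ y := by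
      by_cases hxc : x = cols.length
      · rw [hc0nil hxc]; simp
      · rw [hc0, hcols1, if_neg hxc]
        exact hc2 x le_rfl
    have hc0eq : c0 ++ List.replicate (L.length - c0.length) ' ' = colOf L x := by
      by_cases hxc : x = cols.length
      · rw [hc0nil hxc, hblank hxc]; simp
      · rw [hc0, hcols1, if_neg hxc]
        exact hc1 x (lt_of_le_of_ne hxle hxc)
    have hgetD : ∀ i, i ≠ x → (cols1.set x newv).getD i [] = cols.getD i [] := by
      intro i hi
      have h1 : (cols1.set x newv)[i]? = cols1[i]? := List.getElem?_set_ne (Ne.symm hi)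
      show ((cols1.set x newv)[i]?).getD [] = (cols[i]?).getD []
      rw [h1, hcols1]
      by_cases hxc : x = cols.length
      · rw [if_pos hxc]
        by_cases hilt : i < cols.length
        · rw [List.getElem?_append_left hilt]
        · have h2 : cols[i]? = none := List.getElem?_eq_none (by omega)
          have h3 : (cols ++ [[]])[i]? = none := List.getElem?_eq_none (by
            simp only [List.length_append, List.length_cons, List.length_nil]
            omega)
          rw [h2, h3]
      · rw [if_neg hxc]
    have hgetDx : (cols1.set x newv).getD x [] = newv := by
      show ((cols1.set x newv)[x]?).getD [] = newv
      rw [List.getElem?_set_self hxlt]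
      rfl
    refine ⟨by simp, by rw [hLlen]; omega, by rw [List.getLast?_concat]; simp [hx], ?_, ?_, ?_⟩
    · rw [List.length_set, hcols1len]
      have hmap : L.map List.length = ((L.map List.length).dropLast) ++ [x] := by
        conv_lhs => rw [show L = L.dropLast ++ [L.getLast?.getD []] by
          rw [List.getLast?_eq_some_getLast hne]
          simp [List.dropLast_concat_getLast hne]]
        simp [hx, List.map_dropLast]
      have hmap2 : (L.dropLast ++ [(L.getLast?.getD []) ++ [ch]]).map List.length
          = ((L.map List.length).dropLast) ++ [x + 1] := by
        simp [List.map_dropLast, hx]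
      rw [hmap, List.foldr_append, foldr_max_init] at hlen
      rw [hmap2, List.foldr_append, foldr_max_init]
      simp only [List.foldr_cons, List.foldr_nil] at hlen ⊢
      omega
    · intro i hi
      rw [List.length_set] at hi
      by_cases hix : i = x
      · subst hix
        rw [hgetDx, hnewv]
        have hlen2 : (c0 ++ List.replicate (y - c0.length) ' ' ++ [ch]).length = L.length := by
          simp only [List.length_append, List.length_replicate, List.length_cons, List.length_nil]
          omega
        rw [hLlen, hlen2, Nat.sub_self, List.replicate_zero, List.append_nil]
        rw [colOf_split _ (by simp) i, List.dropLast_concat, List.getLast?_concat]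
        have hgetch : (((L.getLast?.getD []) ++ [ch]) : List Char).getD i ' ' = ch := by
          rw [List.getD_append_right _ _ _ _ (le_of_eq hx.symm)]
          simp [← hx]
        show c0 ++ List.replicate (y - c0.length) ' ' ++ [ch]
            = colOf (L.dropLast) i ++ [(some ((L.getLast?.getD []) ++ [ch])).getD [] |>.getD i ' ']
        have hdropcol : colOf L.dropLast i = c0 ++ List.replicate (y - c0.length) ' ' := by
          have h1 := colOf_split L hne i
          rw [← hc0eq] at h1
          have hlastD : (L.getLast?.getD []).getD i ' ' = ' ' := by
            rw [List.getD_eq_default _ _ (by omega)]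
          rw [hlastD] at h1
          have h2 : L.length - c0.length = (y - c0.length) + 1 := by omega
          rw [h2, List.replicate_succ', ← List.append_assoc] at h1
          exact (List.append_inj_left' h1 rfl).symm
        simp only [Option.getD_some]
        rw [hdropcol, hgetch]
      · rw [hgetD i hix]
        have hilt : i < cols.length := by
          rw [hcols1len] at hi
          rcases Nat.lt_or_ge i cols.length with h | h
          · exact h
          · exfalso; omega
        rw [colOf_split _ (by simp) i, List.dropLast_concat, List.getLast?_concat]
        have hgetch : (((L.getLast?.getD []) ++ [ch]) : List Char).getD i ' '
            = (L.getLast?.getD []).getD i ' ' := by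
          by_cases hilt2 : i < x
          · exact List.getD_append _ _ _ _ (by omega)
          · rw [List.getD_eq_default _ _ (by simp; omega),
                List.getD_eq_default _ _ (by omega)]
        simp only [Option.getD_some]
        rw [hgetch, ← colOf_split L hne i, hLlen]
        exact hc1 i hilt
    · intro i hi
      rw [hgetD i (by omega)]
      exact hc2 i (by omega)

lemma colinv_foldl (cs : List Char) : ∀ (L : List (List Char)) (st : List (List Char) × Nat × Nat),
    ColInv L st.1 st.2.1 st.2.2 →
    ColInv (List.foldl extChar L cs) (List.foldl bStep st cs).1
        (List.foldl bStep st cs).2.1 (List.foldl bStep st cs).2.2 := by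
  induction cs with
  | nil => intro L st h; exact h
  | cons c rest ih =>
    intro L st h
    simp only [List.foldl_cons]
    exact ih (extChar L c) (bStep st c)
      (by obtain ⟨cols, y, x⟩ := st; exact colinv_step L cols y x c h)

lemma colinv_init : ColInv [[]] [[]] 0 0 := by
  refine ⟨by simp, rfl, by simp, by simp, ?_, ?_⟩
  · intro i hi
    have h0 : i = 0 := by simp at hi; omega
    subst h0
    simp [colOf]
  · intro i _
    cases i <;> simp [List.getD]

-- ===== VERDICT (by name: the statement is the Claim_ definition above) =====
set_option maxHeartbeats 1000000 in
theorem swap_xy_axes_spec : Claim_equal_swap_xy_axes := by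
  intro text _
  unfold Spec_swap_xy_axes swap_xy_axes swap_xy_axes_alt
  dsimp only
  set lines := PySem.Chars.splitOn text.toList ['\n'] with hlines
  have hlsp : lines = List.splitOnP (· == '\n') text.toList := splitOn_eq _
  have hne : lines ≠ [] := by rw [hlsp]; exact List.splitOnP_ne_nil _ _
  set mx := max 1 ((lines.map List.length).foldr max 0) with hmx
  -- B side: the invariant at the end of the pass
  have hColInv := colinv_foldl text.toList [[]] ([[]], 0, 0) colinv_init
  rw [foldl_extChar_eq, ← hlsp] at hColInv
  obtain ⟨_, hy, _, hclen, hc1, _⟩ := hColInv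
  set st := List.foldl bStep ([[]], 0, 0) text.toList with hst
  have hBmap : st.1.map (fun c => c ++ List.replicate (st.2.1 + 1 - c.length) ' ')
      = (List.range mx).map (colOf lines) := by
    apply List.ext_getElem
    · simp [hclen, hmx]
    · intro i h1 h2
      simp only [List.getElem_map, List.getElem_range]
      have hilt : i < st.1.length := by simpa using h1
      have hco := hc1 i hilt
      rw [← hy] at hco
      have hgd : st.1[i] = st.1.getD i [] := (List.getD_eq_getElem st.1 [] hilt).symm
      rw [hgd]
      exact hco
  -- A side: the double loop reads the padded grid column by column
  have hmaxeq : lines.foldl (fun m r => max m r.length) 1 = mx := foldl_max_len lines 1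
  rw [hmaxeq]
  rw [PySem.List.foldl_append_singleton_eq_map (fun r => r ++ List.replicate (mx - r.length) ' ') lines []]
  rw [List.nil_append]
  set a2 := lines.map (fun r => r ++ List.replicate (mx - r.length) ' ') with ha2
  rw [PySem.List.foldl_append_singleton_eq_map
    (fun x => (PySem.List.pyRange 0 (lines.length : Int) 1).foldl
      (fun c y => c ++ [PySem.List.pyGetD (PySem.List.pyGetD a2 y []) x ' ']) []) _ []]
  rw [List.nil_append]
  rw [hBmap]
  rw [PySem.List.pyRange_zero_natCast mx]
  rw [List.map_map]
  congr 2
  apply List.map_congr_left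
  intro k _
  simp only [Function.comp]
  rw [PySem.List.foldl_append_singleton_eq_map
    (fun y => PySem.List.pyGetD (PySem.List.pyGetD a2 y []) (k : Int) ' ') _ []]
  rw [List.nil_append]
  have hrows : (PySem.List.pyRange 0 (lines.length : Int) 1).map (fun y => PySem.List.pyGetD a2 y []) = a2 := by
    have := PySem.List.map_pyGetD_pyRange_zero a2 ([] : List Char)
    have hlena2 : a2.length = lines.length := by simp [ha2]
    simpa [PySem.List.len_eq, hlena2] using this
  calc (PySem.List.pyRange 0 (lines.length : Int) 1).map
        (fun y => PySem.List.pyGetD (PySem.List.pyGetD a2 y []) (k : Int) ' ')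
      = ((PySem.List.pyRange 0 (lines.length : Int) 1).map (fun y => PySem.List.pyGetD a2 y [])).map
        (fun r => PySem.List.pyGetD r (k : Int) ' ') := by rw [List.map_map]; rfl
    _ = a2.map (fun r => PySem.List.pyGetD r (k : Int) ' ') := by rw [hrows]
    _ = a2.map (fun r => r.getD k ' ') := by
        apply List.map_congr_left; intro r _; exact PySem.List.pyGetD_natCast r k ' '
    _ = colOf lines k := by
        rw [ha2, List.map_map]
        apply List.map_congr_left
        intro r _
        exact getD_pad r mx k
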